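-- pv_equiv track=rewrite | github.com/guljeny/keerbe_firmware | utils.py | prepare_to_save
-- ===== SOURCE A (Python) =====
-- def number_to_array (number):
--     number_array = []
--     for digit in list(str(number)):
--         number_array.append(int(digit))
--
--     return number_array
--
-- def prepare_to_save (value, size = None):
--     if type(value) == int:
--         value = number_to_array(value)
--     doubled = []
--     for i, val in enumerate(value):
--         if not i%2:
--             second_value = value[i + 1] if i + 1 < len(value) else ''
--             merged_int = str(val) + str(second_value)
--             doubled.append(int(merged_int))
--     if size and size - len(doubled) > 0:
--         doubled = [0] * (size - len(doubled)) + doubled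
--     return doubled
-- ===== SOURCE B (Python) =====
-- from itertools import zip_longest
--
--
-- def number_to_array(number):
--     return [int(d) for d in str(number)]
--
--
-- def prepare_to_save(value, size=None):
--     if type(value) == int:
--         value = number_to_array(value)
--     it = iter(value)
--     doubled = [int(f"{a}{b}") for a, b in zip_longest(it, it, fillvalue='')]
--     pad = (size or 0) - len(doubled)
--     if pad > 0:
--         doubled = [0] * pad + doubled
--     return doubled
-- ===== Notes on version B (the rewrite author's own statement) =====
-- stated objective: idiomatic
-- what changed: The index-parity loop with enumerate and an explicit lookahead value[i+1] is replaced by the standard-library pairing idiom zip_longest(it, it, fillvalue='') over a single iterator, and the two-condition size guard becomes a single computed pad = (size or 0) - len(doubled).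
import Mathlib
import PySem

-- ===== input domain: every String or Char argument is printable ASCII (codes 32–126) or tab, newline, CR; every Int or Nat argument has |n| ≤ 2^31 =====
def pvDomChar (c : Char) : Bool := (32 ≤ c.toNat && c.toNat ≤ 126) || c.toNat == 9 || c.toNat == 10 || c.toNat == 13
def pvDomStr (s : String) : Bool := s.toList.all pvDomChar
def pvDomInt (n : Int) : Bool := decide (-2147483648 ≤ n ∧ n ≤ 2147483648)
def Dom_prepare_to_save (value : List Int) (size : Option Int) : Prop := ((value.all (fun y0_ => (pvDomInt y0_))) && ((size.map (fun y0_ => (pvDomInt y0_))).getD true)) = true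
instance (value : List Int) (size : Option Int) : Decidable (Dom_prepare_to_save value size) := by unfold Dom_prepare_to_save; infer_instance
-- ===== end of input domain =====

-- B (idiomatic): the index-parity loop with an explicit lookahead value[i+1] is replaced by the
-- std-lib pairing idiom zip_longest(it, it, fillvalue='') consuming the list two elements at a
-- time; the size guard becomes a single computed pad. Same values everywhere A returns.

-- ===== PORT A =====
-- Since value : List Int, Python's `type(value) == int` branch (number_to_array) is never taken
-- and is dropped; the loop body is transliterated step for step.
def prepare_to_save (value : List Int) (size : Option Int) : List Int :=
  let doubled : List Int :=
    (PySem.List.enumerate value 0).foldl (fun doubled p =>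
      let i := p.1
      let val := p.2
      if PySem.Int.mod i 2 = 0 then
        -- second_value = value[i + 1] if i + 1 < len(value) else ''  (string form of the pair)
        -- pyGet? is guarded by i + 1 < len, so the `.getD 0` default is never the value used
        let second_value : String :=
          if i + 1 < (value.length : Int) then
            PySem.Int.toStr ((PySem.List.pyGet? value (i + 1)).getD 0)
          else ""
        let merged_int : String := PySem.Int.toStr val ++ second_value
        -- int(merged_int): ValueError (ofStr? = none) only when value[i+1] < 0; Pre_ excludes that
        doubled ++ [(PySem.Int.ofStr? merged_int).getD 0]
      else doubled) []
  match size with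
  | none => doubled
  | some s =>
      if s ≠ 0 ∧ s - (doubled.length : Int) > 0 then
        List.replicate (s - (doubled.length : Int)).toNat 0 ++ doubled
      else doubled

-- ===== PORT B =====
-- zip_longest(it, it, fillvalue='') over one iterator = consume the list two at a time;
-- the comprehension body int(f"{a}{b}") is ported unchanged (getD 0 unreachable under Pre_).
def pvPairMerge : List Int → List Int
  | [] => []
  | [a] => [(PySem.Int.ofStr? (PySem.Int.toStr a ++ "")).getD 0]
  | a :: b :: r =>
      (PySem.Int.ofStr? (PySem.Int.toStr a ++ PySem.Int.toStr b)).getD 0 :: pvPairMerge r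

def prepare_to_save_alt (value : List Int) (size : Option Int) : List Int :=
  let doubled := pvPairMerge value
  let pad : Int := (size.getD 0) - (doubled.length : Int)
  if pad > 0 then List.replicate pad.toNat 0 ++ doubled else doubled

-- ===== PRECONDITION & SPEC =====
-- Pre_ excludes exactly the inputs on which A raises ValueError: a negative element at an odd
-- index makes int(str(val) + str(second_value)) fail (e.g. int("12-3")); B raises there too.
def Pre_prepare_to_save (value : List Int) (size : Option Int) : Prop :=
  ∀ p ∈ PySem.List.enumerate value 0, PySem.Int.mod p.1 2 = 1 → 0 ≤ p.2
instance (value : List Int) (size : Option Int) : Decidable (Pre_prepare_to_save value size) := by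
  unfold Pre_prepare_to_save; infer_instance

def pvWitness_prepare_to_save : List Int × Option Int := ([12, 3, 4], some 5)

def Spec_prepare_to_save (value : List Int) (size : Option Int) (out : List Int) : Prop := out = prepare_to_save_alt value size
instance (value : List Int) (size : Option Int) (out : List Int) : Decidable (Spec_prepare_to_save value size out) := by unfold Spec_prepare_to_save; infer_instance

-- ===== CLAIM (what is proved, stated in full; the proofs are below) =====
def Claim_equal_prepare_to_save : Prop := ∀ (value : List Int) (size : Option Int), Dom_prepare_to_save value size → Pre_prepare_to_save value size → Spec_prepare_to_save value size (prepare_to_save value size)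

-- ===== LEMMAS AND PROOFS =====

-- A's loop step (the closure over `value`)
def pvStepA (value : List Int) (doubled : List Int) (p : Int × Int) : List Int :=
  let i := p.1
  let val := p.2
  if PySem.Int.mod i 2 = 0 then
    let second_value : String :=
      if i + 1 < (value.length : Int) then
        PySem.Int.toStr ((PySem.List.pyGet? value (i + 1)).getD 0)
      else ""
    doubled ++ [(PySem.Int.ofStr? (PySem.Int.toStr val ++ second_value)).getD 0]
  else doubled

lemma pvStepA_eq (value : List Int) :
    (fun (doubled : List Int) (p : Int × Int) =>
      if PySem.Int.mod p.1 2 = 0 then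
        doubled ++ [(PySem.Int.ofStr? (PySem.Int.toStr p.2 ++
          (if p.1 + 1 < (value.length : Int) then
            PySem.Int.toStr ((PySem.List.pyGet? value (p.1 + 1)).getD 0)
          else ""))).getD 0]
      else doubled) = pvStepA value := rfl

lemma pvLoopA (value : List Int) :
    ∀ (n k : Nat) (acc : List Int), value.length - k = n → k % 2 = 0 →
    (PySem.List.enumerate (value.drop k) (k : Int)).foldl (pvStepA value) acc
      = acc ++ pvPairMerge (value.drop k) := by
  intro n
  induction n using Nat.strong_induction_on with
  | _ n ih =>
    intro k acc hn hk
    match hd : value.drop k with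
    | [] => simp [PySem.List.enumerate_nil, pvPairMerge]
    | [a] =>
        have hlen : value.length = k + 1 := by
          have := List.length_drop (l := value) (i := k)
          rw [hd] at this; simp at this; omega
        simp only [PySem.List.enumerate_cons, PySem.List.enumerate_nil,
          List.foldl_cons, List.foldl_nil, pvPairMerge]
        have hlt : ¬ ((k : Int) + 1 < (value.length : Int)) := by
          rw [hlen]; push_cast; omega
        simp [pvStepA, hlt]
        omega
    | a :: b :: r =>
        have hlen : value.length = r.length + 2 + k := by
          have := List.length_drop (l := value) (i := k)
          rw [hd] at this; simp at this
          have hkle : k ≤ value.length := by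
            by_contra h
            have : value.drop k = [] := List.drop_eq_nil_of_le (by omega)
            rw [hd] at this; simp at this
          omega
        have hdrop2 : value.drop (k + 2) = r := by
          rw [← List.drop_drop, hd]; rfl
        have hget : value[k + 1]? = some b := by
          have h1 : (value.drop k)[1]? = some b := by rw [hd]; rfl
          rw [List.getElem?_drop] at h1; exact h1
        simp only [PySem.List.enumerate_cons, List.foldl_cons]
        have hlt : (k : Int) + 1 < (value.length : Int) := by
          rw [hlen]; push_cast; omega
        have hgetI : PySem.List.pyGet? value ((k : Int) + 1) = some b := by
          have hc : ((k : Int) + 1) = ((k + 1 : Nat) : Int) := by push_cast; ring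
          rw [hc, PySem.List.pyGet?_natCast, hget]
        have hstep1 : pvStepA value acc ((k : Int), a)
            = acc ++ [(PySem.Int.ofStr? (PySem.Int.toStr a ++ PySem.Int.toStr b)).getD 0] := by
          simp [pvStepA, hlt, hgetI]
          omega
        have hstep2 : ∀ acc', pvStepA value acc' ((k : Int) + 1, b) = acc' := by
          intro acc'
          simp [pvStepA]
          omega
        have hcast : (k : Int) + 1 + 1 = ((k + 2 : Nat) : Int) := by push_cast; ring
        rw [hstep1, hstep2, hcast]
        have := ih r.length (by omega) (k + 2)
          (acc ++ [(PySem.Int.ofStr? (PySem.Int.toStr a ++ PySem.Int.toStr b)).getD 0])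
          (by omega) (by omega)
        rw [hdrop2] at this
        rw [this, pvPairMerge]
        simp

lemma pvLoopA_main (value : List Int) :
    (PySem.List.enumerate value 0).foldl (pvStepA value) [] = pvPairMerge value := by
  have := pvLoopA value value.length 0 [] (by omega) (by omega)
  simpa using this

-- ===== VERDICT (by name: the statement is the Claim_ definition above) =====
theorem prepare_to_save_spec : Claim_equal_prepare_to_save := by
  intro value size _hdom _hpre
  unfold Spec_prepare_to_save prepare_to_save prepare_to_save_alt
  rw [pvStepA_eq, pvLoopA_main]
  match size with
  | none =>
      simp only [Option.getD]
      have : ¬ ((0 : Int) - ((pvPairMerge value).length : Int) > 0) := by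
        have : (0 : Int) ≤ ((pvPairMerge value).length : Int) := by positivity
        omega
      simp
  | some s =>
      simp only [Option.getD]
      by_cases h : s - ((pvPairMerge value).length : Int) > 0
      · have hs : s ≠ 0 := by
          have : (0 : Int) ≤ ((pvPairMerge value).length : Int) := by positivity
          omega
        simp [hs]
      · have h1 : ¬ (((pvPairMerge value).length : Int) < s) := by omega
        simp [h1]
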